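-- pv_equiv track=rewrite | github.com/chloe238/manage-digital-ingest-flet-CollectionBuilder | utils.py | calculate_string_similarity
-- ===== SOURCE A (Python) =====
-- def calculate_string_similarity(str1, str2):
--     """
--     Calculate similarity between two strings using a simple approach.
--     Returns a percentage (0-100) of how similar the strings are.
--     """
--     if str1 == str2:
--         return 100
--
--     # Simple substring matching approach
--     if str1 in str2 or str2 in str1:
--         # Calculate ratio based on length overlap
--         overlap = min(len(str1), len(str2))
--         total = max(len(str1), len(str2))
--         return int((overlap / total) * 100)
--
--     # Count common characters
--     common_chars = 0
--     str1_chars = list(str1)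
--     str2_chars = list(str2)
--
--     for char in str1_chars:
--         if char in str2_chars:
--             common_chars += 1
--             str2_chars.remove(char)
--
--     # Calculate similarity based on common characters
--     total_chars = max(len(str1), len(str2))
--     if total_chars == 0:
--         return 0
--
--     return int((common_chars / total_chars) * 100)
-- ===== SOURCE B (Python) =====
-- def calculate_string_similarity(str1, str2):
--     """
--     Calculate similarity between two strings using a simple approach.
--     Returns a percentage (0-100) of how similar the strings are.
--     """
--     if str1 == str2:
--         return 100
--
--     n, m = len(str1), len(str2)
--     total = max(n, m)  # > 0 here: the strings differ, so at least one is non-empty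
--
--     if str1 in str2 or str2 in str1:
--         return int((min(n, m) / total) * 100)
--
--     # Common characters = size of the multiset intersection, counted by a
--     # single merge pass over the two sorted character lists.
--     a = sorted(str1)
--     b = sorted(str2)
--     common = i = j = 0
--     while i < n and j < m:
--         if a[i] == b[j]:
--             common += 1
--             i += 1
--             j += 1
--         elif a[i] < b[j]:
--             i += 1
--         else:
--             j += 1
--
--     return int((common / total) * 100)
-- ===== Notes on version B (the rewrite author's own statement) =====
-- stated objective: faster
-- what changed: The quadratic character-matching loop (membership test plus list.remove per character) is replaced by sorting both strings once and counting common characters in a single two-pointer merge pass; the equality, substring and percentage arithmetic are kept verbatim.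
import Mathlib
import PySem

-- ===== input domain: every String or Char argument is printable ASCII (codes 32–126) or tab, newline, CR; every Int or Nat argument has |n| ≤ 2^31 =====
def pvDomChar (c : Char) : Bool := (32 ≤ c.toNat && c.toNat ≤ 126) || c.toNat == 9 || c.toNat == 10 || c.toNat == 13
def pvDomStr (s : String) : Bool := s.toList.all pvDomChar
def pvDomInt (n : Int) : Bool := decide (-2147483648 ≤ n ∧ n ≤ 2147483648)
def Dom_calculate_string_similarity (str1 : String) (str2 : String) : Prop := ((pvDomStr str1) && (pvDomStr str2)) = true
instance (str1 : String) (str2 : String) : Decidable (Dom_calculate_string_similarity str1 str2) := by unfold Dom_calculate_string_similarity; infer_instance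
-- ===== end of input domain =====

-- B replaces A's quadratic remove-loop for counting common characters by a sort + two-pointer
-- merge pass (asymptotically faster); equality/substring branches and the percentage arithmetic
-- are unchanged.

-- Shared arithmetic helper: an EXACT model of Python's `int((a / b) * 100)` for 0 ≤ a ≤ b
-- (both Pythons contain this literal expression). It emulates the two IEEE-754 double
-- roundings (a/b, then *100) with integer arithmetic, round-to-nearest ties-to-even.
def pvRoundNE (p q : Nat) : Nat :=
  let m := p / q
  let r := p % q
  if 2 * r > q ∨ (2 * r = q ∧ m % 2 = 1) then m + 1 else m

-- smallest k with b ≤ a * 2^k (fuel-bounded; called with fuel = b, enough since 1 ≤ a)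
def pvFindK : Nat → Nat → Nat → Nat
  | 0, _, _ => 0
  | fuel + 1, a, b => if b ≤ a then 0 else pvFindK fuel (2 * a) b + 1

def pvPct100 (a b : Nat) : Int :=
  if a = 0 then 0
  else
    let k := pvFindK b a b
    let m1 := pvRoundNE (a * 2 ^ (52 + k)) b      -- a/b rounded to a 53-bit mantissa
    let t := m1 * 100
    let s := Nat.log2 t - 52
    let m2 := pvRoundNE t (2 ^ s)                 -- the product rounded back to 53 bits
    ((if 52 + k ≤ s then m2 * 2 ^ (s - 52 - k) else m2 / 2 ^ (52 + k - s)) : Nat)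

-- ===== PORT A =====
def calculate_string_similarity (str1 : String) (str2 : String) : Int :=
  if str1 = str2 then 100
  else if PySem.Str.isIn str1 str2 || PySem.Str.isIn str2 str1 then
    let overlap := min str1.toList.length str2.toList.length
    let total := max str1.toList.length str2.toList.length
    pvPct100 overlap total
  else
    -- for char in str1_chars: if char in str2_chars: common += 1; str2_chars.remove(char)
    let st := str1.toList.foldl
      (fun (st : Nat × List Char) c => if c ∈ st.2 then (st.1 + 1, st.2.erase c) else st)
      (0, str2.toList)
    let total_chars := max str1.toList.length str2.toList.length
    if total_chars = 0 then 0 else pvPct100 st.1 total_chars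

-- ===== PORT B =====
-- single merge pass over the two sorted character lists
def pvMergeCount : List Char → List Char → Nat
  | [], _ => 0
  | _ :: _, [] => 0
  | x :: xs, y :: ys =>
    if x = y then pvMergeCount xs ys + 1
    else if x < y then pvMergeCount xs (y :: ys)
    else pvMergeCount (x :: xs) ys
  termination_by l1 l2 => l1.length + l2.length

def calculate_string_similarity_alt (str1 : String) (str2 : String) : Int :=
  if str1 = str2 then 100
  else
    let n := str1.toList.length
    let m := str2.toList.length
    let total := max n m  -- > 0 here: the strings differ, so at least one is non-empty
    if PySem.Str.isIn str1 str2 || PySem.Str.isIn str2 str1 then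
      pvPct100 (min n m) total
    else
      let a := PySem.List.sorted str1.toList (fun x => x) false
      let b := PySem.List.sorted str2.toList (fun x => x) false
      pvPct100 (pvMergeCount a b) total

-- ===== PRECONDITION & SPEC =====
def Spec_calculate_string_similarity (str1 : String) (str2 : String) (out : Int) : Prop := out = calculate_string_similarity_alt str1 str2
instance (str1 : String) (str2 : String) (out : Int) : Decidable (Spec_calculate_string_similarity str1 str2 out) := by unfold Spec_calculate_string_similarity; infer_instance

-- ===== CLAIM (what is proved, stated in full; the proofs are below) =====
def Claim_equal_calculate_string_similarity : Prop := ∀ (str1 : String) (str2 : String), Dom_calculate_string_similarity str1 str2 → Spec_calculate_string_similarity str1 str2 (calculate_string_similarity str1 str2)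

-- ===== LEMMAS AND PROOFS =====

-- A's remove-loop computes the size of the multiset intersection
theorem pv_loop_eq_inter_card (l1 : List Char) : ∀ (l2 : List Char) (n : Nat),
    (l1.foldl (fun (st : Nat × List Char) c =>
        if c ∈ st.2 then (st.1 + 1, st.2.erase c) else st) (n, l2)).1
      = n + ((l1 : Multiset Char) ∩ (l2 : Multiset Char)).card := by
  induction l1 with
  | nil => intro l2 n; simp
  | cons c l1 ih =>
    intro l2 n
    rw [List.foldl_cons]
    by_cases h : c ∈ l2
    · rw [if_pos h, show ((n, l2).1 + 1, (n, l2).2.erase c) = (n + 1, l2.erase c) from rfl,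
        ih, ← Multiset.cons_coe, Multiset.cons_inter_of_pos _ (Multiset.mem_coe.mpr h),
        Multiset.card_cons, Multiset.coe_erase]
      omega
    · rw [if_neg h, ih, ← Multiset.cons_coe,
        Multiset.cons_inter_of_neg _ (by simpa using h)]

-- B's merge pass computes the same on sorted lists
theorem pv_mergeCount_eq_inter_card : ∀ (xs ys : List Char),
    xs.Pairwise (· ≤ ·) → ys.Pairwise (· ≤ ·) →
    pvMergeCount xs ys = ((xs : Multiset Char) ∩ (ys : Multiset Char)).card := by
  intro xs ys
  induction xs, ys using pvMergeCount.induct with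
  | case1 ys => intro _ _; simp [pvMergeCount]
  | case2 x xs => intro _ _; simp [pvMergeCount]
  | case3 xs y ys ih =>
    intro hx hy
    rw [pvMergeCount, if_pos rfl]
    simp only [← Multiset.cons_coe]
    rw [Multiset.cons_inter_of_pos _ (Multiset.mem_cons_self y _),
      Multiset.erase_cons_head, Multiset.card_cons,
      ih (List.Pairwise.of_cons hx) (List.Pairwise.of_cons hy)]
  | case4 x xs y ys hne hlt ih =>
    intro hx hy
    have hnot : x ∉ (y ::ₘ (ys : Multiset Char)) := by
      simp only [Multiset.mem_cons, Multiset.mem_coe]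
      rintro (rfl | hmem)
      · exact lt_irrefl _ hlt
      · exact absurd rfl (ne_of_lt (lt_of_lt_of_le hlt ((List.pairwise_cons.mp hy).1 _ hmem)))
    rw [pvMergeCount, if_neg hne, if_pos hlt]
    simp only [← Multiset.cons_coe]
    rw [Multiset.cons_inter_of_neg _ hnot]
    simp only [Multiset.cons_coe]
    exact ih (List.Pairwise.of_cons hx) hy
  | case5 x xs y ys hne hnlt ih =>
    intro hx hy
    have hyx : y < x := by
      rcases lt_trichotomy x y with h | h | h
      · exact absurd h hnlt
      · exact absurd h hne
      · exact h
    have hnot : y ∉ (x ::ₘ (xs : Multiset Char)) := by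
      simp only [Multiset.mem_cons, Multiset.mem_coe]
      rintro (rfl | hmem)
      · exact lt_irrefl _ hyx
      · exact absurd rfl (ne_of_lt (lt_of_lt_of_le hyx ((List.pairwise_cons.mp hx).1 _ hmem)))
    rw [pvMergeCount, if_neg hne, if_neg hnlt, Multiset.inter_comm]
    simp only [← Multiset.cons_coe]
    rw [Multiset.cons_inter_of_neg _ hnot, Multiset.inter_comm]
    simp only [Multiset.cons_coe]
    exact ih hx (List.Pairwise.of_cons hy)

-- the two counting strategies agree
theorem pv_counts_agree (str1 str2 : String) :
    (str1.toList.foldl (fun (st : Nat × List Char) c =>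
        if c ∈ st.2 then (st.1 + 1, st.2.erase c) else st) (0, str2.toList)).1
      = pvMergeCount (PySem.List.sorted str1.toList (fun x => x) false)
                     (PySem.List.sorted str2.toList (fun x => x) false) := by
  rw [pv_loop_eq_inter_card, pv_mergeCount_eq_inter_card _ _
        (by simpa using PySem.List.sorted_pairwise str1.toList (fun x => x))
        (by simpa using PySem.List.sorted_pairwise str2.toList (fun x => x))]
  rw [Multiset.coe_eq_coe.mpr (PySem.List.sorted_perm str1.toList (fun x => x) false),
      Multiset.coe_eq_coe.mpr (PySem.List.sorted_perm str2.toList (fun x => x) false)]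
  simp

-- ===== VERDICT (by name: the statement is the Claim_ definition above) =====
theorem calculate_string_similarity_spec : Claim_equal_calculate_string_similarity := by
  intro str1 str2 _
  unfold Spec_calculate_string_similarity
  by_cases h1 : str1 = str2
  · simp [calculate_string_similarity, calculate_string_similarity_alt, h1]
  · have htot : ¬ (max str1.toList.length str2.toList.length = 0) := by
      intro h
      rcases Nat.max_eq_zero_iff.mp h with ⟨ha, hb⟩
      exact h1 (String.toList_inj.mp
        ((List.length_eq_zero_iff.mp ha).trans (List.length_eq_zero_iff.mp hb).symm))
    simp only [calculate_string_similarity, calculate_string_similarity_alt,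
      if_neg h1, if_neg htot, pv_counts_agree]
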